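-- pv_equiv track=rewrite | github.com/primrose101/CS322 | dataTypeLexer.py | unary_lexer
-- ===== SOURCE A (Python) =====
-- def unary_lexer(string_input, index):
--     i = index
--
--     state_table = [[1,1,2,2],
--                    [2,2,1,2],
--                    [2,2,2,2],]
--
--     state = 0
--     infut = 0
--
--     string_length = len(string_input)
--
--     while i != string_length:
--         if string_input[i] == '-':
--             infut = 0
--         elif string_input[i] == '+':
--             infut = 1
--         elif string_input[i].isdigit():
--             infut = 2
--         else:
--             infut = 3
--
--         state = state_table[state][infut]
--
--         if state == 2:
--             break
--
--         i += 1
--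
--     return i
-- ===== SOURCE B (Python) =====
-- def unary_lexer(string_input, index):
--     i = index
--     n = len(string_input)
--     if i == n or string_input[i] not in '+-':
--         return i
--     i += 1
--     while i < n and string_input[i].isdigit():
--         i += 1
--     return i
-- ===== Notes on version B (the rewrite author's own statement) =====
-- stated objective: simpler
-- what changed: Replaces the table-driven automaton (state_table, state and infut variables, break-on-state-2 loop) by direct control flow: one sign check followed by a plain digit-consuming while loop.
import Mathlib
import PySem

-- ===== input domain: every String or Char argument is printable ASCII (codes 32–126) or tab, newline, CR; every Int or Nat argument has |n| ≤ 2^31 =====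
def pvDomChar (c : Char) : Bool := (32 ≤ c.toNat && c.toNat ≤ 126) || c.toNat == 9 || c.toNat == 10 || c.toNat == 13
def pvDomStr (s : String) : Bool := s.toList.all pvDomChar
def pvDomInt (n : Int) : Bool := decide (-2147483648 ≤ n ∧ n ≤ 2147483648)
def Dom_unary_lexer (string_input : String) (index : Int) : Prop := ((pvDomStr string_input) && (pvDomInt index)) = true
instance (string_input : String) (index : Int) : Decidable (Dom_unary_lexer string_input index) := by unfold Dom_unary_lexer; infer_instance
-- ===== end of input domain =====

-- B replaces A's state-table automaton by direct control flow (sign check, then a digit loop); same return value, no speed claim.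

-- ===== PORT A =====
-- A's state table, kept as data exactly as in the Python.
def pvATable : List (List Int) := [[1, 1, 2, 2], [2, 2, 1, 2], [2, 2, 2, 2]]

-- A's while loop; fuel = number of remaining iterations (i walks up to string_length).
-- pyGet? none = IndexError in Python: that input is outside Pre_ and the returned value is irrelevant.
def pvALoop (s : List Char) (n : Int) (fuel : Nat) (i state : Int) : Int :=
  match fuel with
  | 0 => i
  | Nat.succ fuel =>
    if i = n then i
    else
      match PySem.List.pyGet? s i with
      | none => i
      | some c =>
        let infut : Int :=
          if c = '-' then 0
          else if c = '+' then 1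
          else if PySem.Chars.isdigit c then 2
          else 3
        let state' := PySem.List.pyGetD (PySem.List.pyGetD pvATable state []) infut (2 : Int)
        if state' = 2 then i else pvALoop s n fuel (i + 1) state'

def unary_lexer (string_input : String) (index : Int) : Int :=
  pvALoop string_input.toList (string_input.toList.length : Int)
    (((string_input.toList.length : Int) - index).toNat) index 0

-- ===== PORT B =====
-- B's digit-consuming while loop: while i < n and s[i].isdigit(): i += 1
def pvBLoop (s : List Char) (n : Int) (fuel : Nat) (i : Int) : Int :=
  match fuel with
  | 0 => i
  | Nat.succ fuel =>
    if i < n then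
      match PySem.List.pyGet? s i with
      | none => i
      | some c => if PySem.Chars.isdigit c then pvBLoop s n fuel (i + 1) else i
    else i

def unary_lexer_alt (string_input : String) (index : Int) : Int :=
  let cs := string_input.toList
  let n : Int := cs.length
  if index = n then index
  else
    match PySem.List.pyGet? cs index with
    | none => index
    | some c =>
      if c = '+' ∨ c = '-' then
        pvBLoop cs n ((n - (index + 1)).toNat) (index + 1)
      else index

-- ===== PRECONDITION & SPEC =====
-- Pre_ excludes only the inputs on which A raises IndexError: index outside [-len, len].
def Pre_unary_lexer (string_input : String) (index : Int) : Prop :=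
  -(string_input.toList.length : Int) ≤ index ∧ index ≤ (string_input.toList.length : Int)
instance (string_input : String) (index : Int) : Decidable (Pre_unary_lexer string_input index) := by
  unfold Pre_unary_lexer; infer_instance

def pvWitness_unary_lexer : String × Int := ("+12a", 0)

def Spec_unary_lexer (string_input : String) (index : Int) (out : Int) : Prop := out = unary_lexer_alt string_input index
instance (string_input : String) (index : Int) (out : Int) : Decidable (Spec_unary_lexer string_input index out) := by unfold Spec_unary_lexer; infer_instance

-- ===== CLAIM (what is proved, stated in full; the proofs are below) =====
def Claim_equal_unary_lexer : Prop := ∀ (string_input : String) (index : Int), Dom_unary_lexer string_input index → Pre_unary_lexer string_input index → Spec_unary_lexer string_input index (unary_lexer string_input index)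

-- ===== LEMMAS AND PROOFS =====

-- The table lookups A performs, evaluated once.
theorem pvT10 : PySem.List.pyGetD (PySem.List.pyGetD pvATable 1 []) 0 (2 : Int) = 2 := by decide
theorem pvT11 : PySem.List.pyGetD (PySem.List.pyGetD pvATable 1 []) 1 (2 : Int) = 2 := by decide
theorem pvT12 : PySem.List.pyGetD (PySem.List.pyGetD pvATable 1 []) 2 (2 : Int) = 1 := by decide
theorem pvT13 : PySem.List.pyGetD (PySem.List.pyGetD pvATable 1 []) 3 (2 : Int) = 2 := by decide
theorem pvT00 : PySem.List.pyGetD (PySem.List.pyGetD pvATable 0 []) 0 (2 : Int) = 1 := by decide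
theorem pvT01 : PySem.List.pyGetD (PySem.List.pyGetD pvATable 0 []) 1 (2 : Int) = 1 := by decide
theorem pvT02 : PySem.List.pyGetD (PySem.List.pyGetD pvATable 0 []) 2 (2 : Int) = 2 := by decide
theorem pvT03 : PySem.List.pyGetD (PySem.List.pyGetD pvATable 0 []) 3 (2 : Int) = 2 := by decide

theorem pvGet_some (s : List Char) (i : Int) (hlo : -(s.length : Int) ≤ i)
    (hlt : i < (s.length : Int)) : ∃ c, PySem.List.pyGet? s i = some c := by
  rcases h : PySem.List.pyGet? s i with _ | c
  · rw [PySem.List.pyGet?_eq_none_iff] at h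
    exact absurd ⟨hlo, hlt⟩ h
  · exact ⟨c, rfl⟩


-- In state 1 A's automaton consumes exactly the digits B's while loop consumes.
theorem pvLoop_state1_eq (s : List Char) (fuel : Nat) :
    ∀ i : Int, -(s.length : Int) ≤ i → i + fuel = (s.length : Int) →
      pvALoop s (s.length : Int) fuel i 1 = pvBLoop s (s.length : Int) fuel i := by
  induction fuel with
  | zero => intro i _ _; rfl
  | succ fuel ih =>
    intro i hlo hsum
    have hlt : i < (s.length : Int) := by omega
    have hne : i ≠ (s.length : Int) := by omega
    obtain ⟨c, hc⟩ := pvGet_some s i hlo hlt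
    simp only [pvALoop, pvBLoop, hne, if_false, hlt, if_true, hc]
    by_cases hm : c = '-'
    · simp [hm, pvT10, PySem.Chars.isdigit]
    · by_cases hp : c = '+'
      · simp [hp, pvT11, PySem.Chars.isdigit]
      · by_cases hd : PySem.Chars.isdigit c
        · simp only [hm, hp, hd, if_false, if_true, pvT12]
          have h1 : ¬ (1 : Int) = 2 := by decide
          simp only [h1, if_false]
          exact ih (i + 1) (by omega) (by omega)
        · simp [hm, hp, hd, pvT13]

theorem unary_lexer_eq (string_input : String) (index : Int)
    (h : Pre_unary_lexer string_input index) :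
    unary_lexer string_input index = unary_lexer_alt string_input index := by
  obtain ⟨hlo, hhi⟩ := h
  unfold unary_lexer unary_lexer_alt
  by_cases hend : index = (string_input.toList.length : Int)
  · simp only [hend, if_true, sub_self, Int.toNat_zero]
    rfl
  · have hlt : index < (string_input.toList.length : Int) := lt_of_le_of_ne hhi hend
    obtain ⟨c, hc⟩ := pvGet_some string_input.toList index hlo hlt
    have hfuel : ((string_input.toList.length : Int) - index).toNat
        = (((string_input.toList.length : Int) - (index + 1)).toNat) + 1 := by omega
    rw [hfuel]
    simp only [pvALoop, hend, if_false, hc]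
    by_cases hm : c = '-'
    · have h1 : ¬ (1 : Int) = 2 := by decide
      simp only [hm, if_true, pvT00, h1, if_false, or_true]
      exact pvLoop_state1_eq _ _ _ (by omega) (by omega)
    · by_cases hp : c = '+'
      · have h1 : ¬ (1 : Int) = 2 := by decide
        simp only [hp, if_true, pvT01, true_or]
        exact pvLoop_state1_eq _ _ _ (by omega) (by omega)
      · by_cases hd : PySem.Chars.isdigit c
        · simp [hm, hp, hd, pvT02]
        · simp [hm, hp, hd, pvT03]

-- ===== VERDICT (by name: the statement is the Claim_ definition above) =====
theorem unary_lexer_spec : Claim_equal_unary_lexer := by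
  intro string_input index _ hPre
  unfold Spec_unary_lexer
  exact unary_lexer_eq string_input index hPre
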